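-- pv_equiv track=rewrite | github.com/NetRxn/SK_EFT_Hawking | src/vestigial/lattice_4d.py | neighbor_index
-- ===== SOURCE A (Python) =====
-- def neighbor_index(site: int, direction: int, L: int) -> int:
--     """Get the neighbor index in a given direction with periodic BC.
--
--     The 4D site index is linearized as:
--         site = x0 + L*(x1 + L*(x2 + L*x3))
--
--     Args:
--         site: linear site index
--         direction: direction (0=x0, 1=x1, 2=x2, 3=x3)
--         L: linear lattice size
--
--     Returns:
--         Linear index of the neighbor
--     """
--     coords = []
--     s = site
--     for _ in range(4):
--         coords.append(s % L)
--         s //= L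
--
--     coords[direction] = (coords[direction] + 1) % L
--
--     return coords[0] + L * (coords[1] + L * (coords[2] + L * coords[3]))
-- ===== SOURCE B (Python) =====
-- def neighbor_index(site: int, direction: int, L: int) -> int:
--     """Closed-form neighbor index: touch only the one affected coordinate."""
--     strides = [1, L, L * L, L * L * L]
--     stride = strides[direction]
--     s = site % (L ** 4)
--     c = (s // stride) % L
--     return s + ((c + 1) % L - c) * stride
-- ===== Notes on version B (the rewrite author's own statement) =====
-- stated objective: simpler
-- what changed: Replaces the 4-step decompose/bump/reconstruct loop over all coordinates with a closed-form stride computation that normalizes the site modulo L**4 and adjusts only the single affected coordinate.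
-- outside the precondition, e.g. on neighbor_index(1, 3, -2): A returns 9, B returns -7
import Mathlib
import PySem

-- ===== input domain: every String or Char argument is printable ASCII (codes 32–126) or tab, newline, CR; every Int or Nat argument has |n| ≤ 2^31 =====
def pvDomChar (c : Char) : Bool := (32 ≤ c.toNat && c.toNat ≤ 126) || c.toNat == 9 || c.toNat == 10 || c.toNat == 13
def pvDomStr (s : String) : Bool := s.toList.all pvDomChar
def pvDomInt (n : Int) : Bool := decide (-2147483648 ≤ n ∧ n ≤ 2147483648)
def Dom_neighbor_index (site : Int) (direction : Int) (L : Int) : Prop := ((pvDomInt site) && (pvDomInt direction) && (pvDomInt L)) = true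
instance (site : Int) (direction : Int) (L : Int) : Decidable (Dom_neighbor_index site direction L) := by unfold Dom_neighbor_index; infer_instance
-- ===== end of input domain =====

-- B replaces A's decompose/bump/reconstruct loop over all four coordinates by a closed-form
-- stride adjustment of the single affected coordinate (objective: simpler).

-- ===== PORT A =====
-- the loop 'for _ in range(4): coords.append(s % L); s //= L' is the fold over pyRange below
def neighbor_index (site : Int) (direction : Int) (L : Int) : Int :=
  let cs := (PySem.List.pyRange 0 4 1).foldl
    (fun (p : List Int × Int) _ => (p.1 ++ [PySem.Int.mod p.2 L], PySem.Int.floordiv p.2 L))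
    ([], site)
  let coords := cs.1
  let coords := PySem.List.pySetD coords direction
    (PySem.Int.mod (PySem.List.pyGetD coords direction 0 + 1) L)
  PySem.List.pyGetD coords 0 0 +
    L * (PySem.List.pyGetD coords 1 0 +
      L * (PySem.List.pyGetD coords 2 0 + L * PySem.List.pyGetD coords 3 0))

-- ===== PORT B =====
def neighbor_index_alt (site : Int) (direction : Int) (L : Int) : Int :=
  let strides : List Int := [1, L, L * L, L * L * L]
  let stride := PySem.List.pyGetD strides direction 0
  let s := PySem.Int.mod site (L ^ 4)
  let c := PySem.Int.mod (PySem.Int.floordiv s stride) L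
  s + (PySem.Int.mod (c + 1) L - c) * stride

-- ===== PRECONDITION & SPEC =====
-- Pre_ restricts to positive lattice size L ≥ 1 (the natural domain: on negative L — not a
-- meaningful lattice size — A still returns values that B's stride decomposition does not match)
-- and to directions -4..3 (outside them both raise IndexError; at L = 0 both raise ZeroDivisionError).
def Pre_neighbor_index (site : Int) (direction : Int) (L : Int) : Prop :=
  1 ≤ L ∧ -4 ≤ direction ∧ direction ≤ 3
instance (site : Int) (direction : Int) (L : Int) : Decidable (Pre_neighbor_index site direction L) := by unfold Pre_neighbor_index; infer_instance
def pvWitness_neighbor_index : Int × Int × Int := (5, 1, 3)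

def Spec_neighbor_index (site : Int) (direction : Int) (L : Int) (out : Int) : Prop := out = neighbor_index_alt site direction L
instance (site : Int) (direction : Int) (L : Int) (out : Int) : Decidable (Spec_neighbor_index site direction L out) := by unfold Spec_neighbor_index; infer_instance

-- ===== CLAIM (what is proved, stated in full; the proofs are below) =====
def Claim_equal_neighbor_index : Prop := ∀ (site : Int) (direction : Int) (L : Int), Dom_neighbor_index site direction L → Pre_neighbor_index site direction L → Spec_neighbor_index site direction L (neighbor_index site direction L)

-- ===== LEMMAS AND PROOFS =====

-- a digit of the truncated site equals the corresponding digit of the site itself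
theorem pv_digit_gen (site L P R : Int) (hP : P ≠ 0) (h4 : L ^ 4 = P * (L * R)) :
    site % L ^ 4 / P % L = site / P % L := by
  have h : site % L ^ 4 = site + -(L * R * (site / L ^ 4)) * P := by
    rw [Int.emod_def]; rw [h4]; ring
  rw [h, Int.add_mul_ediv_right _ _ hP,
    show site / P + -(L * R * (site / L ^ 4)) = site / P + L * -(R * (site / L ^ 4)) from by ring,
    Int.add_mul_emod_self_left]

-- site % L^4 is the base-L expansion of the four extracted coordinates
theorem pv_recon (site L : Int) (hL : 0 < L) :
    site % L ^ 4 =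
      site % L + L * (site / L % L + L * (site / L / L % L + L * (site / L / L / L % L))) := by
  have e2 : site / L / L = site / (L * L) := Int.ediv_ediv_of_nonneg hL.le
  have e3 : site / (L * L) / L = site / (L * L * L) := Int.ediv_ediv_of_nonneg (by positivity)
  have e4 : site / (L * L * L) / L = site / (L * L * L * L) := Int.ediv_ediv_of_nonneg (by positivity)
  rw [e2, e3]
  simp only [Int.emod_def, e2, e3, e4]
  rw [show (L : Int) ^ 4 = L * L * L * L from by ring]
  ring

-- ===== VERDICT (by name: the statement is the Claim_ definition above) =====
theorem neighbor_index_spec : Claim_equal_neighbor_index := by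
  unfold Claim_equal_neighbor_index
  intro site direction L _ hPre
  obtain ⟨hL1, hdlo, hdhi⟩ := hPre
  have hL : (0 : Int) < L := by omega
  have hL4 : (0 : Int) < L ^ 4 := by positivity
  have hLL : (0 : Int) < L * L := by positivity
  have hLLL : (0 : Int) < L * L * L := by positivity
  have e2 : site / L / L = site / (L * L) := Int.ediv_ediv_of_nonneg hL.le
  have hd0 : site % L ^ 4 % L = site % L :=
    Int.emod_emod_of_dvd site (dvd_pow_self L (by norm_num))
  have hd1 : site % L ^ 4 / L % L = site / L % L :=
    pv_digit_gen site L L (L * L) hL.ne' (by ring)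
  have hd2 : site % L ^ 4 / (L * L) % L = site / (L * L) % L :=
    pv_digit_gen site L (L * L) L hLL.ne' (by ring)
  have hd3 : site % L ^ 4 / (L * L * L) % L = site / (L * L * L) % L :=
    pv_digit_gen site L (L * L * L) 1 hLLL.ne' (by ring)
  have e3' : site / (L * L) / L = site / (L * L * L) := Int.ediv_ediv_of_nonneg (by positivity)
  have hrecon : site % L ^ 4 =
      site % L + L * (site / L % L + L * (site / (L * L) % L + L * (site / (L * L * L) % L))) := by
    rw [pv_recon site L hL, e2, e3']
  unfold Spec_neighbor_index neighbor_index neighbor_index_alt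
  rw [show PySem.List.pyRange 0 4 1 = [0, 1, 2, 3] from by decide]
  interval_cases direction <;>
  · simp only [List.foldl_cons, List.foldl_nil, List.nil_append, List.cons_append]
    simp [PySem.List.pySetD, PySem.List.pySet?, PySem.List.pyGetD, PySem.List.pyGet?,
      PySem.List.pyIdx?]
    simp only [PySem.Int.mod_eq_emod_of_pos hL, PySem.Int.mod_eq_emod_of_pos hL4,
      PySem.Int.floordiv_eq_ediv_of_pos hL, PySem.Int.floordiv_eq_ediv_of_pos hLL,
      PySem.Int.floordiv_eq_ediv_of_pos hLLL, e2, e3', hd0, hd1, hd2, hd3]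
    rw [hrecon]
    ring
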